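-- pv_equiv track=rewrite | github.com/FrancesFerrabee/CS116 | a06q3.py | longest_subpalindrome
-- ===== SOURCE A (Python) =====
-- def is_palindrome(s):
--     q=0
--     c=0
--     while c < len(s):
--         if s[c]== s[len(s)-1-c]:
--             q= q+0
--             c= c+1
--         else:
--             q= q+1
--             c= c+1
--     if q>0:
--         return False
--     else:
--         return True
--
-- def longest_subpalindrome(s):
--     while is_palindrome(s)==False:
--         if is_palindrome(s[:-1]) == True:
--             s= s[:-1]
--             return s
--         if is_palindrome(s[1:]) == True:
--             s= s[1:]
--             return s
--         s= s[:-1]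
--     return s
-- ===== SOURCE B (Python) =====
-- def longest_subpalindrome(s):
--     # Result = the longest palindromic prefix of s or of s[1:], preferring the
--     # prefix of s on equal length (that is exactly what A's trimming loop picks).
--     def lpp(t):
--         # length of the longest palindromic prefix of t
--         for k in range(len(t), -1, -1):
--             p = t[:k]
--             if p == p[::-1]:
--                 return k
--         return 0  # unreachable: the empty prefix is a palindrome
--
--     l1 = lpp(s)
--     l2 = lpp(s[1:])
--     if l2 <= l1:
--         return s[:l1]
--     return s[1:1 + l2]
-- ===== Notes on version B (the rewrite author's own statement) =====
-- stated objective: simpler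
-- what changed: Replaces A's destructive while-loop of repeated trimming with mismatch-counting palindrome checks by a direct characterisation: compute the longest palindromic prefix of s and of s[1:] (each found by one downward scan with p == p[::-1]) and return the longer one, preferring the prefix of s on ties.
import Mathlib
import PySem

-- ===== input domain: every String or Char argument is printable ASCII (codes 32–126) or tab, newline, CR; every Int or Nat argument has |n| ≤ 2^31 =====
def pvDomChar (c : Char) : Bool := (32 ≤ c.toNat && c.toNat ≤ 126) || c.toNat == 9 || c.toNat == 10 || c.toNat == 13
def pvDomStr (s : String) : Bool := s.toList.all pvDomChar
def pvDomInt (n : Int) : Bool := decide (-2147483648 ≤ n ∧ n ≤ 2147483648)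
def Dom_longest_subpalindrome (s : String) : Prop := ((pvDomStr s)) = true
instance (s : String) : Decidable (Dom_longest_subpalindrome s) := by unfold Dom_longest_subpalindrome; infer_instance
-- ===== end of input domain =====

-- B replaces A's trimming while-loop by "longest palindromic prefix of s or of s[1:],
-- preferring s's prefix on ties" (simpler; constant-factor faster in Python).


-- ===== PORT A =====
-- is_palindrome: counts mismatches s[c] vs s[len(s)-1-c] for c = 0..len(s)-1, returns q == 0
def pvIsPalA (l : List Char) : Bool :=
  ((PySem.List.pyRange 0 (l.length : Int) 1).foldl
    (fun q c =>
      if PySem.List.pyGet? l c == PySem.List.pyGet? l ((l.length : Int) - 1 - c) then q + 0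
      else q + 1) (0 : Int)) == 0

theorem pvIsPalA_nil : pvIsPalA [] = true := by decide

-- the while loop of longest_subpalindrome, on the code points
def pvTrimA (l : List Char) : List Char :=
  if h : pvIsPalA l = false then
    if pvIsPalA (PySem.List.slice l none (some (-1))) = true then
      PySem.List.slice l none (some (-1))
    else if pvIsPalA (PySem.List.slice l (some 1) none) = true then
      PySem.List.slice l (some 1) none
    else
      pvTrimA (PySem.List.slice l none (some (-1)))
  else l
termination_by l.length
decreasing_by
  have hne : l ≠ [] := by rintro rfl; rw [pvIsPalA_nil] at h; cases h
  simp [PySem.List.slice_to_neg_one]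
  exact List.length_pos_iff.mpr hne

def longest_subpalindrome (s : String) : String := String.ofList (pvTrimA s.toList)

-- ===== PORT B =====
-- p == p[::-1]
def pvIsPalB (p : List Char) : Bool := p == p.reverse

-- lpp(t): for k in range(len(t), -1, -1): if t[:k] == t[:k][::-1]: return k
def pvLpp (t : List Char) : Nat → Nat
  | 0 => 0
  | (k+1) => if pvIsPalB (t.take (k+1)) then k + 1 else pvLpp t k

def longest_subpalindrome_alt (s : String) : String :=
  if pvLpp (s.toList.drop 1) (s.toList.drop 1).length ≤ pvLpp s.toList s.toList.length then
    String.ofList (s.toList.take (pvLpp s.toList s.toList.length))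
  else
    String.ofList ((s.toList.drop 1).take (pvLpp (s.toList.drop 1) (s.toList.drop 1).length))

-- ===== PRECONDITION & SPEC =====
def Spec_longest_subpalindrome (s : String) (out : String) : Prop := out = longest_subpalindrome_alt s
instance (s : String) (out : String) : Decidable (Spec_longest_subpalindrome s out) := by unfold Spec_longest_subpalindrome; infer_instance

-- ===== CLAIM (what is proved, stated in full; the proofs are below) =====
def Claim_equal_longest_subpalindrome : Prop := ∀ (s : String), Dom_longest_subpalindrome s → Spec_longest_subpalindrome s (longest_subpalindrome s)

-- ===== LEMMAS AND PROOFS =====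

theorem pvIsPalB_nil : pvIsPalB [] = true := by decide

-- characterisation of B's palindrome test by indices
theorem pvIsPalB_iff (l : List Char) :
    pvIsPalB l = true ↔ ∀ i : Nat, i < l.length → l[i]? = l[l.length - 1 - i]? := by
  unfold pvIsPalB
  rw [beq_iff_eq]
  constructor
  · intro h i hi
    conv_lhs => rw [h]
    rw [List.getElem?_reverse hi]
  · intro h
    apply List.ext_getElem?
    intro i
    by_cases hi : i < l.length
    · rw [h i hi, List.getElem?_reverse hi]
    · rw [List.getElem?_eq_none (by omega), List.getElem?_eq_none (by simpa using hi)]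

-- A's mismatch-counting check computes the same as B's reverse test
theorem pvIsPalA_eq (l : List Char) : pvIsPalA l = pvIsPalB l := by
  apply Bool.eq_iff_iff.mpr
  rw [pvIsPalB_iff]
  unfold pvIsPalA
  have hfun : (fun (q : Int) (c : Int) =>
      if PySem.List.pyGet? l c == PySem.List.pyGet? l ((l.length : Int) - 1 - c) then q + 0
      else q + 1)
      = (fun (q : Int) (c : Int) =>
      if !(PySem.List.pyGet? l c == PySem.List.pyGet? l ((l.length : Int) - 1 - c)) then q + 1
      else q) := by
    funext q c
    cases (PySem.List.pyGet? l c == PySem.List.pyGet? l ((l.length : Int) - 1 - c)) <;> simp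
  rw [hfun, PySem.List.foldl_if_add_one]
  rw [beq_iff_eq]
  have key : (0 : Int) + ((PySem.List.pyRange 0 (l.length : Int) 1).countP
      (fun c => !(PySem.List.pyGet? l c == PySem.List.pyGet? l ((l.length : Int) - 1 - c)))) = 0
      ↔ ∀ c ∈ PySem.List.pyRange 0 (l.length : Int) 1,
        (PySem.List.pyGet? l c == PySem.List.pyGet? l ((l.length : Int) - 1 - c)) = true := by
    rw [zero_add]
    norm_cast
    rw [List.countP_eq_zero]
    simp
  rw [key]
  constructor
  · intro h i hi
    have hc := h (i : Int) (by rw [PySem.List.mem_pyRange_one]; omega)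
    rw [beq_iff_eq] at hc
    have h2 : ((l.length : Int) - 1 - (i : Int)) = ((l.length - 1 - i : Nat) : Int) := by omega
    rw [h2, PySem.List.pyGet?_natCast, PySem.List.pyGet?_natCast] at hc
    exact hc
  · intro h c hc
    rw [PySem.List.mem_pyRange_one] at hc
    rw [beq_iff_eq]
    have hi : c.toNat < l.length := by omega
    have h2 : ((l.length : Int) - 1 - c) = ((l.length - 1 - c.toNat : Nat) : Int) := by omega
    have h1 : c = ((c.toNat : Nat) : Int) := by omega
    rw [h2, h1, PySem.List.pyGet?_natCast, PySem.List.pyGet?_natCast]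
    exact h c.toNat hi

theorem pvLpp_le (t : List Char) (k : Nat) : pvLpp t k ≤ k := by
  induction k with
  | zero => simp [pvLpp]
  | succ k ih => unfold pvLpp; split <;> omega

theorem pvLpp_of_pal (t : List Char) (k : Nat) (h : pvIsPalB (t.take k) = true) :
    pvLpp t k = k := by
  cases k with
  | zero => rfl
  | succ k => unfold pvLpp; rw [h]; simp

theorem pvLpp_of_not_pal (t : List Char) (k : Nat) (h : pvIsPalB (t.take (k+1)) = false) :
    pvLpp t (k+1) = pvLpp t k := by
  simp only [pvLpp, h]
  simp

theorem pvLpp_congr (t u : List Char) (k : Nat) (h : t.take k = u.take k) :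
    pvLpp t k = pvLpp u k := by
  induction k with
  | zero => rfl
  | succ k ih =>
      unfold pvLpp
      rw [h]
      have hk : t.take k = u.take k := by
        have h' := congrArg (List.take k) h
        simpa [List.take_take] using h'
      rw [ih hk]

-- B's top-level choice, on the code points
def pvBList (l : List Char) : List Char :=
  if pvLpp (l.drop 1) (l.drop 1).length ≤ pvLpp l l.length then
    l.take (pvLpp l l.length)
  else (l.drop 1).take (pvLpp (l.drop 1) (l.drop 1).length)

theorem pvBList_of_pal (l : List Char) (h : pvIsPalB l = true) : pvBList l = l := by
  unfold pvBList
  have h1 : pvLpp l l.length = l.length :=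
    pvLpp_of_pal l l.length (by rw [List.take_length]; exact h)
  have h2 := pvLpp_le (l.drop 1) (l.drop 1).length
  have h3 : (l.drop 1).length = l.length - 1 := by simp
  rw [if_pos (by rw [h1]; omega)]
  rw [h1, List.take_length]

theorem len_pos_of_not_pal (l : List Char) (h : pvIsPalB l = false) : 1 ≤ l.length := by
  rcases l with _ | ⟨c, t⟩
  · rw [pvIsPalB_nil] at h; cases h
  · simp

theorem len2_of_not_pal (l : List Char) (h : pvIsPalB l = false)
    (h2 : pvIsPalB l.dropLast = false) : 2 ≤ l.length := by
  have g1 := len_pos_of_not_pal l h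
  have g2 := len_pos_of_not_pal l.dropLast h2
  simp at g2
  omega

theorem pvLpp_len_of_not_pal (l : List Char) (h : pvIsPalB l = false) :
    pvLpp l l.length = pvLpp l (l.length - 1) := by
  have g := len_pos_of_not_pal l h
  have he : l.length = (l.length - 1) + 1 := by omega
  rw [he]
  apply pvLpp_of_not_pal
  rw [← he, List.take_length]
  exact h

theorem pvBList_of_pal_dropLast (l : List Char) (h : pvIsPalB l = false)
    (hd : pvIsPalB l.dropLast = true) : pvBList l = l.dropLast := by
  unfold pvBList
  have g := len_pos_of_not_pal l h
  have h1 : pvLpp l l.length = l.length - 1 := by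
    rw [pvLpp_len_of_not_pal l h]
    apply pvLpp_of_pal
    rw [← List.dropLast_eq_take]
    exact hd
  have h2 := pvLpp_le (l.drop 1) (l.drop 1).length
  have h3 : (l.drop 1).length = l.length - 1 := by simp
  rw [if_pos (by rw [h1]; omega)]
  rw [h1, ← List.dropLast_eq_take]

theorem pvLpp_two_steps (l : List Char) (h : pvIsPalB l = false)
    (hd : pvIsPalB l.dropLast = false) : pvLpp l l.length = pvLpp l (l.length - 2) := by
  have g2 := len2_of_not_pal l h hd
  rw [pvLpp_len_of_not_pal l h]
  have he : l.length - 1 = (l.length - 2) + 1 := by omega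
  rw [he]
  apply pvLpp_of_not_pal
  rw [← he, ← List.dropLast_eq_take]
  exact hd

theorem pvBList_of_pal_tail (l : List Char) (h : pvIsPalB l = false)
    (hd : pvIsPalB l.dropLast = false) (ht : pvIsPalB (l.drop 1) = true) :
    pvBList l = l.drop 1 := by
  unfold pvBList
  have g2 := len2_of_not_pal l h hd
  have h2 : pvLpp (l.drop 1) (l.drop 1).length = (l.drop 1).length :=
    pvLpp_of_pal _ _ (by rw [List.take_length]; exact ht)
  have h3 : (l.drop 1).length = l.length - 1 := by simp
  have h1 : pvLpp l l.length ≤ l.length - 2 := by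
    rw [pvLpp_two_steps l h hd]; exact pvLpp_le _ _
  rw [if_neg (by rw [h2, h3]; omega)]
  rw [h2, List.take_length]

theorem pvBList_step (l : List Char) (h : pvIsPalB l = false)
    (hd : pvIsPalB l.dropLast = false) (ht : pvIsPalB (l.drop 1) = false) :
    pvBList l = pvBList l.dropLast := by
  have g2 := len2_of_not_pal l h hd
  have hlen : l.dropLast.length = l.length - 1 := by simp
  have htlen : (l.drop 1).length = l.length - 1 := by simp
  have hdtlen : (l.dropLast.drop 1).length = l.length - 2 := by simp; omega
  have h21 : l.length - 1 - 1 = l.length - 2 := by omega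
  -- the two first-components agree
  have e1 : pvLpp l l.length = pvLpp l.dropLast l.dropLast.length := by
    rw [pvLpp_two_steps l h hd, pvLpp_len_of_not_pal l.dropLast hd, hlen, h21]
    apply pvLpp_congr
    rw [List.dropLast_eq_take, List.take_take]
    congr 1
    omega
  -- the two second-components agree
  have e2 : pvLpp (l.drop 1) (l.drop 1).length
      = pvLpp (l.dropLast.drop 1) (l.dropLast.drop 1).length := by
    rw [pvLpp_len_of_not_pal (l.drop 1) ht, htlen, hdtlen, h21]
    apply pvLpp_congr
    rw [List.dropLast_eq_take, List.drop_take, List.take_take]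
    congr 1
    omega
  have hb1 : pvLpp l l.length ≤ l.length - 2 := by
    rw [pvLpp_two_steps l h hd]; exact pvLpp_le _ _
  have hb2 : pvLpp (l.drop 1) (l.drop 1).length ≤ l.length - 2 := by
    rw [pvLpp_len_of_not_pal (l.drop 1) ht, htlen]
    have := pvLpp_le (l.drop 1) (l.length - 1 - 1)
    omega
  unfold pvBList
  rw [← e1, ← e2]
  have r1 : l.take (pvLpp l l.length) = l.dropLast.take (pvLpp l l.length) := by
    rw [List.dropLast_eq_take, List.take_take]
    congr 1
    omega
  have r2 : (l.drop 1).take (pvLpp (l.drop 1) (l.drop 1).length)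
      = (l.dropLast.drop 1).take (pvLpp (l.drop 1) (l.drop 1).length) := by
    rw [List.dropLast_eq_take, List.drop_take, List.take_take]
    congr 1
    omega
  split <;> [rw [← r1]; rw [← r2]]

theorem pvTrim_eq_bList (l : List Char) : pvTrimA l = pvBList l := by
  induction l using pvTrimA.induct with
  | case1 l h h1 =>
      unfold pvTrimA
      rw [dif_pos h, if_pos h1]
      rw [pvIsPalA_eq] at h h1
      rw [PySem.List.slice_to_neg_one] at h1 ⊢
      exact (pvBList_of_pal_dropLast l h h1).symm
  | case2 l h h1 h2 =>
      unfold pvTrimA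
      rw [dif_pos h, if_neg h1, if_pos h2]
      simp only [Bool.not_eq_true] at h1
      rw [pvIsPalA_eq] at h h1 h2
      rw [PySem.List.slice_to_neg_one] at h1
      rw [PySem.List.slice_from_one] at h2 ⊢
      rw [← List.drop_one] at h2 ⊢
      exact (pvBList_of_pal_tail l h h1 h2).symm
  | case3 l h h1 h2 ih =>
      unfold pvTrimA
      rw [dif_pos h, if_neg h1, if_neg h2]
      simp only [Bool.not_eq_true] at h1 h2
      rw [pvIsPalA_eq] at h h1 h2
      rw [PySem.List.slice_to_neg_one] at h1 ih ⊢
      rw [PySem.List.slice_from_one, ← List.drop_one] at h2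
      rw [ih]
      exact (pvBList_step l h h1 h2).symm
  | case4 l h =>
      unfold pvTrimA
      rw [dif_neg h]
      simp only [Bool.not_eq_false] at h
      rw [pvIsPalA_eq] at h
      exact (pvBList_of_pal l h).symm

-- ===== VERDICT (by name: the statement is the Claim_ definition above) =====
theorem longest_subpalindrome_spec : Claim_equal_longest_subpalindrome := by
  intro s _
  unfold Spec_longest_subpalindrome longest_subpalindrome longest_subpalindrome_alt
  rw [pvTrim_eq_bList]
  unfold pvBList
  split <;> rfl
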